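-- pv_equiv track=rewrite | github.com/jgfranco/formation | 2025_07/findLeftPeaks.py | find_left_peaks
-- ===== SOURCE A (Python) =====
-- def find_left_peaks(arr):
--
--     p = len(arr) - 1
--     from collections import deque
--     leftPeaks = deque([])
--     largestSeen = float("-inf")
--
--     while p >=0:
--         num = arr[p]
--         if num >= largestSeen:
--             leftPeaks.appendleft(num)
--             largestSeen = num
--         p -=1
--
--     return list(leftPeaks)
-- ===== SOURCE B (Python) =====
-- def find_left_peaks(arr):
--     n = len(arr)
--     suffix = [None] * n  # None stands for -inf (empty suffix)
--     best = None
--     for i in range(n - 1, -1, -1):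
--         suffix[i] = best
--         if best is None or arr[i] > best:
--             best = arr[i]
--     return [arr[i] for i in range(n) if suffix[i] is None or arr[i] >= suffix[i]]
-- ===== Notes on version B (the rewrite author's own statement) =====
-- stated objective: alternative
-- what changed: Replaces the right-to-left deque-appendleft scan with a precomputed suffix-maximum table followed by a plain forward filtering pass that builds the result front-to-back.
import Mathlib
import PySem

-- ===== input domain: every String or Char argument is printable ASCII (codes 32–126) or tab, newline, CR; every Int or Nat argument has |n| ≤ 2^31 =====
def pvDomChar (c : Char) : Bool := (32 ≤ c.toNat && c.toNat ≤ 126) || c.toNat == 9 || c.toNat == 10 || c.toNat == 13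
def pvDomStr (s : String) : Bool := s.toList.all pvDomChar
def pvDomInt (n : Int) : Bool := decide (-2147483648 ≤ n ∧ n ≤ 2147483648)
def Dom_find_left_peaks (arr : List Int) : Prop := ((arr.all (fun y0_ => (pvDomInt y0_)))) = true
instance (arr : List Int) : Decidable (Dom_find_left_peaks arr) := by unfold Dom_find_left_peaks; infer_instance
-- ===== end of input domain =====

-- B replaces the right-to-left deque scan with a suffix-maximum table plus a forward
-- filtering pass (alternative decomposition, same O(n) cost).

-- num >= largestSeen, where `none` models float("-inf")
def pyGeOpt (x : Int) (m : Option Int) : Bool :=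
  match m with
  | none => true
  | some v => decide (v ≤ x)

-- ===== PORT A =====
-- the while loop over p = n-1 … 0 processes arr right-to-left; state = (deque-as-list, largestSeen)
def goA : List Int → List Int → Option Int → List Int
  | [], acc, _ => acc
  | n :: rest, acc, m =>
      if pyGeOpt n m then goA rest (n :: acc) (some n) else goA rest acc m

def find_left_peaks (arr : List Int) : List Int := goA arr.reverse [] none

-- ===== PORT B =====
-- best = arr[i] if best is None or arr[i] > best else best
def stepB (m : Option Int) (x : Int) : Option Int :=
  match m with
  | none => some x
  | some v => if x > v then some x else some v

-- backward pass of Source B: returns (suffix table, best); suffix[i] = max of arr[i+1:] (none = -inf)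
def sufTab : List Int → List (Option Int) × Option Int
  | [] => ([], none)
  | x :: xs =>
      let r := sufTab xs
      (r.2 :: r.1, stepB r.2 x)

-- forward comprehension of Source B: keep arr[i] iff suffix[i] is None or arr[i] >= suffix[i]
def find_left_peaks_alt (arr : List Int) : List Int :=
  (arr.zip (sufTab arr).1).filterMap (fun p => if pyGeOpt p.1 p.2 then some p.1 else none)

-- ===== PRECONDITION & SPEC =====
def Spec_find_left_peaks (arr : List Int) (out : List Int) : Prop := out = find_left_peaks_alt arr
instance (arr : List Int) (out : List Int) : Decidable (Spec_find_left_peaks arr out) := by unfold Spec_find_left_peaks; infer_instance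

-- ===== CLAIM (what is proved, stated in full; the proofs are below) =====
def Claim_equal_find_left_peaks : Prop := ∀ (arr : List Int), Dom_find_left_peaks arr → Spec_find_left_peaks arr (find_left_peaks arr)

-- ===== LEMMAS AND PROOFS =====

-- A's loop, without the accumulator: kept elements in processing (right-to-left) order
def keep : List Int → Option Int → List Int
  | [], _ => []
  | n :: rest, m => if pyGeOpt n m then n :: keep rest (some n) else keep rest m

theorem goA_eq (l : List Int) : ∀ (acc : List Int) (m : Option Int),
    goA l acc m = (keep l m).reverse ++ acc := by
  induction l with
  | nil => intro acc m; simp [goA, keep]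
  | cons n rest ih =>
      intro acc m
      by_cases h : pyGeOpt n m = true <;> simp [goA, keep, h, ih]

def mfold (m : Option Int) (l : List Int) : Option Int := l.foldl stepB m

theorem stepB_of_ge (m : Option Int) (n : Int) (h : pyGeOpt n m = true) :
    stepB m n = some n := by
  cases m with
  | none => rfl
  | some v =>
      simp [pyGeOpt] at h
      simp [stepB]
      omega

theorem stepB_of_lt (m : Option Int) (n : Int) (h : ¬ pyGeOpt n m = true) :
    stepB m n = m := by
  cases m with
  | none => simp [pyGeOpt] at h
  | some v =>
      simp [pyGeOpt] at h
      simp [stepB]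
      omega

theorem keep_append_single (l : List Int) : ∀ (m : Option Int) (x : Int),
    keep (l ++ [x]) m = keep l m ++ (if pyGeOpt x (mfold m l) then [x] else []) := by
  induction l with
  | nil => intro m x; simp [keep, mfold]
  | cons n rest ih =>
      intro m x
      by_cases h : pyGeOpt n m = true
      · simp only [List.cons_append, keep, h, if_true, ih, mfold, List.foldl_cons,
          stepB_of_ge m n h]
        simp
      · simp only [List.cons_append, keep, h, ih, mfold, List.foldl_cons,
          stepB_of_lt m n h]
        simp

theorem mfold_reverse (l : List Int) : mfold none l.reverse = (sufTab l).2 := by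
  induction l with
  | nil => rfl
  | cons x xs ih =>
      simp only [List.reverse_cons, mfold, List.foldl_append, List.foldl_cons, List.foldl_nil]
      rw [show xs.reverse.foldl stepB none = mfold none xs.reverse from rfl, ih]
      rfl

theorem main_eq (arr : List Int) : find_left_peaks arr = find_left_peaks_alt arr := by
  induction arr with
  | nil => rfl
  | cons x xs ih =>
      have hA : find_left_peaks (x :: xs)
          = (if pyGeOpt x ((sufTab xs).2) then [x] else []) ++ find_left_peaks xs := by
        simp only [find_left_peaks, List.reverse_cons, keep_append_single, goA_eq,
          List.append_nil, List.reverse_append, mfold_reverse]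
        cases h : pyGeOpt x ((sufTab xs).2) <;> simp
      have hB : find_left_peaks_alt (x :: xs)
          = (if pyGeOpt x ((sufTab xs).2) then [x] else []) ++ find_left_peaks_alt xs := by
        simp only [find_left_peaks_alt, sufTab, List.zip_cons_cons, List.filterMap_cons]
        cases h : pyGeOpt x ((sufTab xs).2) <;> simp [h]
      rw [hA, hB, ih]

-- ===== VERDICT (by name: the statement is the Claim_ definition above) =====
theorem find_left_peaks_spec : Claim_equal_find_left_peaks := by
  intro arr _
  exact main_eq arr
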